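-- pv_equiv track=rewrite | github.com/reshinto/algo_flow | src/algorithms/sorting/exchange/circle-sort/sources/circle-sort.py | _circle_sort_pass
-- ===== SOURCE A (Python) =====
-- def _circle_sort_pass(sorted_array: list[int], left_index: int, right_index: int) -> bool:
--     if left_index >= right_index:
--         return False
--
--     swapped = False
--     low = left_index
--     high = right_index
--
--     while low < high:
--         # @step:compare
--         if sorted_array[low] > sorted_array[high]:  # @step:compare
--             # @step:swap
--             temporary_value = sorted_array[low]  # @step:swap
--             sorted_array[low] = sorted_array[high]  # @step:swap
--             sorted_array[high] = temporary_value  # @step:swap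
--             swapped = True
--         low += 1
--         high -= 1
--
--     # If the midpoint element is reached (odd-length segment), compare it with one above
--     if low == high:
--         if sorted_array[low] > sorted_array[high + 1]:  # @step:compare
--             # @step:swap
--             temporary_value = sorted_array[low]  # @step:swap
--             sorted_array[low] = sorted_array[high + 1]  # @step:swap
--             sorted_array[high + 1] = temporary_value  # @step:swap
--             swapped = True
--
--     midpoint = (left_index + right_index) // 2
--     left_swapped = _circle_sort_pass(sorted_array, left_index, midpoint)
--     right_swapped = _circle_sort_pass(sorted_array, midpoint + 1, right_index)
--
--     return swapped or left_swapped or right_swapped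
-- ===== SOURCE B (Python) =====
-- def _segment_pass(sorted_array: list[int], lo: int, hi: int) -> bool:
--     """One inward compare/swap sweep over segment [lo, hi] including the
--     odd-length midpoint case; returns whether any swap happened."""
--     swapped = False
--     low, high = lo, hi
--     while low < high:
--         if sorted_array[low] > sorted_array[high]:
--             sorted_array[low], sorted_array[high] = sorted_array[high], sorted_array[low]
--             swapped = True
--         low += 1
--         high -= 1
--     if low == high:
--         if sorted_array[low] > sorted_array[high + 1]:
--             sorted_array[low], sorted_array[high + 1] = sorted_array[high + 1], sorted_array[low]
--             swapped = True
--     return swapped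
--
--
-- def _circle_sort_pass(sorted_array: list[int], left_index: int, right_index: int) -> bool:
--     # Iterative work-list (explicit stack) instead of recursion; same mutation
--     # order as the recursive version (LIFO with the left half pushed last).
--     swapped = False
--     stack = [(left_index, right_index)]
--     while stack:
--         lo, hi = stack.pop()
--         if lo >= hi:
--             continue
--         if _segment_pass(sorted_array, lo, hi):
--             swapped = True
--         mid = (lo + hi) // 2
--         stack.append((mid + 1, hi))
--         stack.append((lo, mid))
--     return swapped
-- ===== Notes on version B (the rewrite author's own statement) =====
-- stated objective: alternative
-- what changed: Replaced the double recursion with an explicit work-list (stack) loop that pops a segment, runs the inward compare/swap sweep (factored into a helper), and pushes the two halves, OR-ing the swap flag into a single accumulator.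
import Mathlib
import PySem

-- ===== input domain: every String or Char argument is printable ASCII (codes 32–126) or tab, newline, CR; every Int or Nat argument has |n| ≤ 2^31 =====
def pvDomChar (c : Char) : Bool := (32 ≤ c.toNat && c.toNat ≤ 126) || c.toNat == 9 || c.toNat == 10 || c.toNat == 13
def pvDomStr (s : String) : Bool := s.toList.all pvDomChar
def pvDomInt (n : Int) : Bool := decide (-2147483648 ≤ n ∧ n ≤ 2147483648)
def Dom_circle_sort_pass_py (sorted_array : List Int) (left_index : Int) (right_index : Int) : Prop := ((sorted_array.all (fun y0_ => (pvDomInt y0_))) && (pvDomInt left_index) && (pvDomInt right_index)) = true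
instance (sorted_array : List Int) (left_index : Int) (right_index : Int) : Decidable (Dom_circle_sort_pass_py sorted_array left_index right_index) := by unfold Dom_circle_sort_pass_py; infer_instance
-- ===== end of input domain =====

-- B replaces A's double recursion by an explicit work-list (stack) loop with one OR-accumulated
-- flag (objective: alternative decomposition). Both Pythons mutate sorted_array identically (same
-- swap sequence); the theorems here are about the returned Bool, with the array state threaded
-- explicitly through both ports. Each recursion carries a Nat fuel as a pure totality guard,
-- always called with fuel strictly above the number of steps the Python performs.

-- ===== PORT A =====
-- the inward compare/swap sweep over [lo, hi] plus the odd-midpoint case; this code appears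
-- verbatim (inline) in Python A and as the helper _segment_pass in Python B, so both ports use it.
-- total forms pyGetD/pySetD are exact under Pre_ (all touched indices in Python range).
def pvSegLoop (fuel : Nat) (arr : List Int) (low high : Int) (swapped : Bool) :
    List Int × Int × Int × Bool :=
  match fuel with
  | 0 => (arr, low, high, swapped)
  | f + 1 =>
    if low < high then
      let a := PySem.List.pyGetD arr low 0
      let b := PySem.List.pyGetD arr high 0
      if a > b then
        pvSegLoop f (PySem.List.pySetD (PySem.List.pySetD arr low b) high a) (low + 1) (high - 1) true
      else
        pvSegLoop f arr (low + 1) (high - 1) swapped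
    else (arr, low, high, swapped)

def pvSegPass (arr : List Int) (lo hi : Int) : List Int × Bool :=
  let r := pvSegLoop ((hi - lo).toNat + 1) arr lo hi false
  let arr1 := r.1
  let low := r.2.1
  let high := r.2.2.1
  let sw := r.2.2.2
  if low = high then
    let a := PySem.List.pyGetD arr1 low 0
    let b := PySem.List.pyGetD arr1 (high + 1) 0
    if a > b then
      (PySem.List.pySetD (PySem.List.pySetD arr1 low b) (high + 1) a, true)
    else (arr1, sw)
  else (arr1, sw)

-- recursive pass of A, threading the mutated array; fuel bounds the recursion depth
def pvPassAF : Nat → List Int → Int → Int → List Int × Bool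
  | 0, arr, _, _ => (arr, false)
  | f + 1, arr, l, r =>
    if l ≥ r then (arr, false)
    else
      let p := pvSegPass arr l r
      let m := PySem.Int.floordiv (l + r) 2
      let pl := pvPassAF f p.1 l m
      let pr := pvPassAF f pl.1 (m + 1) r
      (pr.1, p.2 || pl.2 || pr.2)

def circle_sort_pass_py (sorted_array : List Int) (left_index : Int) (right_index : Int) : Bool :=
  (pvPassAF ((right_index - left_index).toNat + 1) sorted_array left_index right_index).2

-- ===== PORT B =====
-- the explicit work-list loop of B (stack of segments, accumulated flag); fuel bounds the
-- number of loop iterations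
def pvPassBF : Nat → List (Int × Int) → List Int → Bool → List Int × Bool
  | 0, _, arr, swapped => (arr, swapped)
  | _ + 1, [], arr, swapped => (arr, swapped)
  | f + 1, (lo, hi) :: rest, arr, swapped =>
    if lo ≥ hi then pvPassBF f rest arr swapped
    else
      let p := pvSegPass arr lo hi
      let mid := PySem.Int.floordiv (lo + hi) 2
      pvPassBF f ((lo, mid) :: (mid + 1, hi) :: rest) p.1 (swapped || p.2)

def circle_sort_pass_py_alt (sorted_array : List Int) (left_index : Int) (right_index : Int) : Bool :=
  (pvPassBF (2 * (right_index - left_index).toNat + 2) [(left_index, right_index)] sorted_array false).2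

-- ===== PRECONDITION & SPEC =====
-- Pre_ excludes exactly the inputs where Python A raises IndexError: a nonempty segment whose
-- endpoints are not both valid Python indices of sorted_array.
def Pre_circle_sort_pass_py (sorted_array : List Int) (left_index : Int) (right_index : Int) : Prop :=
  left_index ≥ right_index ∨
    (-(sorted_array.length : Int) ≤ left_index ∧ right_index < (sorted_array.length : Int))
instance (sorted_array : List Int) (left_index : Int) (right_index : Int) : Decidable (Pre_circle_sort_pass_py sorted_array left_index right_index) := by unfold Pre_circle_sort_pass_py; infer_instance

def pvWitness_circle_sort_pass_py : List Int × Int × Int := ([3, 1, 2, 5, 4], 0, 4)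

def Spec_circle_sort_pass_py (sorted_array : List Int) (left_index : Int) (right_index : Int) (out : Bool) : Prop := out = circle_sort_pass_py_alt sorted_array left_index right_index
instance (sorted_array : List Int) (left_index : Int) (right_index : Int) (out : Bool) : Decidable (Spec_circle_sort_pass_py sorted_array left_index right_index out) := by unfold Spec_circle_sort_pass_py; infer_instance

-- ===== CLAIM =====
def Claim_equal_circle_sort_pass_py : Prop := ∀ (sorted_array : List Int) (left_index : Int) (right_index : Int), Dom_circle_sort_pass_py sorted_array left_index right_index → Pre_circle_sort_pass_py sorted_array left_index right_index → Spec_circle_sort_pass_py sorted_array left_index right_index (circle_sort_pass_py sorted_array left_index right_index)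

-- ===== LEMMAS AND PROOFS =====
-- A's pass at its canonical fuel
def pvPassA (arr : List Int) (l r : Int) : List Int × Bool :=
  pvPassAF ((r - l).toNat + 1) arr l r

-- running the work list segment by segment through A's recursive pass
def pvRunAll (stack : List (Int × Int)) (arr : List Int) (swapped : Bool) : List Int × Bool :=
  match stack with
  | [] => (arr, swapped)
  | (lo, hi) :: rest =>
    let p := pvPassA arr lo hi
    pvRunAll rest p.1 (swapped || p.2)

def pvSegWeight : Int × Int → Nat
  | (l, r) => if l < r then 2 * (r - l).toNat + 1 else 1

theorem pvMidBounds (l r : Int) (h : ¬ l ≥ r) :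
    l ≤ PySem.Int.floordiv (l + r) 2 ∧ PySem.Int.floordiv (l + r) 2 < r := by
  have h1 := PySem.Int.floordiv_two_mid_bounds (lo := l) (hi := r) (by omega)
  have h2 : PySem.Int.floordiv (l + r) 2 < r := by
    rw [PySem.Int.floordiv_lt_iff_lt_mul (by omega)]; omega
  exact ⟨h1.1, h2⟩

theorem pvPassAF_fuel : ∀ (f f' : Nat) (arr : List Int) (l r : Int),
    (r - l).toNat < f → (r - l).toNat < f' →
    pvPassAF f arr l r = pvPassAF f' arr l r := by
  intro f
  induction f using Nat.strong_induction_on with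
  | _ f ih =>
    intro f' arr l r hf hf'
    match f, f' with
    | fa + 1, fb + 1 =>
      by_cases h : l ≥ r
      · simp [pvPassAF, h]
      · have hm := pvMidBounds l r h
        rw [pvPassAF, pvPassAF]
        simp only [h, if_false]
        have e1 : pvPassAF fa (pvSegPass arr l r).1 l (PySem.Int.floordiv (l + r) 2)
            = pvPassAF fb (pvSegPass arr l r).1 l (PySem.Int.floordiv (l + r) 2) :=
          ih fa (by omega) fb _ _ _ (by omega) (by omega)
        rw [e1]
        have e2 : pvPassAF fa (pvPassAF fb (pvSegPass arr l r).1 l (PySem.Int.floordiv (l + r) 2)).1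
              (PySem.Int.floordiv (l + r) 2 + 1) r
            = pvPassAF fb (pvPassAF fb (pvSegPass arr l r).1 l (PySem.Int.floordiv (l + r) 2)).1
              (PySem.Int.floordiv (l + r) 2 + 1) r :=
          ih fa (by omega) fb _ _ _ (by omega) (by omega)
        rw [e2]

theorem pvPassA_base (arr : List Int) (l r : Int) (h : l ≥ r) : pvPassA arr l r = (arr, false) := by
  unfold pvPassA
  rw [pvPassAF]
  simp [h]

theorem pvPassA_step (arr : List Int) (l r : Int) (h : ¬ l ≥ r) :
    pvPassA arr l r =
      (let p := pvSegPass arr l r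
       let m := PySem.Int.floordiv (l + r) 2
       let pl := pvPassA p.1 l m
       let pr := pvPassA pl.1 (m + 1) r
       (pr.1, p.2 || pl.2 || pr.2)) := by
  have hm := pvMidBounds l r h
  conv_lhs => rw [pvPassA, pvPassAF]
  simp only [h, if_false]
  simp only [pvPassA]
  have e1 : pvPassAF ((r - l).toNat) (pvSegPass arr l r).1 l (PySem.Int.floordiv (l + r) 2)
      = pvPassAF ((PySem.Int.floordiv (l + r) 2 - l).toNat + 1) (pvSegPass arr l r).1 l
          (PySem.Int.floordiv (l + r) 2) :=
    pvPassAF_fuel _ _ _ _ _ (by omega) (by omega)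
  rw [e1]
  have e2 : pvPassAF ((r - l).toNat)
        (pvPassAF ((PySem.Int.floordiv (l + r) 2 - l).toNat + 1) (pvSegPass arr l r).1 l
            (PySem.Int.floordiv (l + r) 2)).1
        (PySem.Int.floordiv (l + r) 2 + 1) r
      = pvPassAF ((r - (PySem.Int.floordiv (l + r) 2 + 1)).toNat + 1)
        (pvPassAF ((PySem.Int.floordiv (l + r) 2 - l).toNat + 1) (pvSegPass arr l r).1 l
            (PySem.Int.floordiv (l + r) 2)).1
        (PySem.Int.floordiv (l + r) 2 + 1) r :=
    pvPassAF_fuel _ _ _ _ _ (by omega) (by omega)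
  rw [e2]

theorem pvStackSum_pop (lo hi : Int) (rest : List (Int × Int)) :
    ((rest.map pvSegWeight).sum) < ((((lo, hi) :: rest).map pvSegWeight).sum) := by
  simp [pvSegWeight]; split_ifs <;> omega

theorem pvStackSum_split (lo hi : Int) (rest : List (Int × Int)) (h : ¬ lo ≥ hi) :
    ((((lo, PySem.Int.floordiv (lo + hi) 2) :: (PySem.Int.floordiv (lo + hi) 2 + 1, hi) :: rest).map pvSegWeight).sum) <
      ((((lo, hi) :: rest).map pvSegWeight).sum) := by
  simp [pvSegWeight]; split_ifs <;> omega

theorem pvPassBF_eq_runAll : ∀ (f : Nat) (stack : List (Int × Int)) (arr : List Int) (sw : Bool),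
    (stack.map pvSegWeight).sum < f →
    pvPassBF f stack arr sw = pvRunAll stack arr sw := by
  intro f
  induction f using Nat.strong_induction_on with
  | _ f ih =>
    intro stack arr sw hs
    match f, stack with
    | fa + 1, [] => simp [pvPassBF, pvRunAll]
    | fa + 1, (lo, hi) :: rest =>
      by_cases h : lo ≥ hi
      · rw [pvPassBF]
        simp only [h, if_pos]
        rw [ih fa (by omega) rest arr sw
              (by have := pvStackSum_pop lo hi rest; omega)]
        simp only [pvRunAll]
        simp [pvPassA_base arr lo hi h]
      · rw [pvPassBF]
        simp only [h, if_false]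
        rw [ih fa (by omega) _ _ _
              (by have := pvStackSum_split lo hi rest h; omega)]
        simp only [pvRunAll]
        rw [pvPassA_step arr lo hi h]
        simp [Bool.or_assoc]

theorem pvAlt_eq (arr : List Int) (l r : Int) :
    circle_sort_pass_py_alt arr l r = (pvPassA arr l r).2 := by
  unfold circle_sort_pass_py_alt
  rw [pvPassBF_eq_runAll (2 * (r - l).toNat + 2) [(l, r)] arr false
        (by simp [pvSegWeight]; split_ifs <;> omega)]
  simp [pvRunAll]

-- ===== VERDICT =====
theorem circle_sort_pass_py_spec : Claim_equal_circle_sort_pass_py := by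
  intro arr l r _ _
  unfold Spec_circle_sort_pass_py circle_sort_pass_py
  rw [pvAlt_eq]
  rfl
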